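-- pv_equiv track=rewrite | github.com/alfredgamulo/advent_of_code | 2023/24/main.py | find_normal_vector
-- ===== SOURCE A (Python) =====
-- def cross_product(v1, v2):
--     return (
--         v1[1] * v2[2] - v1[2] * v2[1],
--         v1[2] * v2[0] - v1[0] * v2[2],
--         v1[0] * v2[1] - v1[1] * v2[0],
--     )
--
-- def find_normal_vector(trajectories):
--     points = [
--         (trajectory[0], trajectory[1], trajectory[2]) for trajectory in trajectories
--     ]
--     # Find a plane that intersects all trajectories
--     for i in range(len(points)):
--         for j in range(i + 1, len(points)):
--             for k in range(j + 1, len(points)):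
--                 # Vector v1 and v2 on the plane formed by three non-collinear points
--                 v1 = (
--                     points[j][0] - points[i][0],
--                     points[j][1] - points[i][1],
--                     points[j][2] - points[i][2],
--                 )
--                 v2 = (
--                     points[k][0] - points[i][0],
--                     points[k][1] - points[i][1],
--                     points[k][2] - points[i][2],
--                 )
--
--                 # Calculate the normal vector using cross product
--                 normal = cross_product(v1, v2)
--
--                 # Check if the normal vector is non-zero
--                 if any(normal):
--                     return normal
-- ===== SOURCE B (Python) =====
-- def cross_product(v1, v2):
--     return (
--         v1[1] * v2[2] - v1[2] * v2[1],
--         v1[2] * v2[0] - v1[0] * v2[2],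
--         v1[0] * v2[1] - v1[1] * v2[0],
--     )
--
-- def find_normal_vector(trajectories):
--     # Two linear passes anchored at the first point: any non-collinear triple
--     # exists iff one exists with the first point, and the first normal A finds
--     # is the first one found here.
--     points = [(t[0], t[1], t[2]) for t in trajectories]
--     if not points:
--         return None
--     p0 = points[0]
--     rest = points[1:]
--     # skip duplicates of p0; the first distinct point fixes the line direction
--     while rest and rest[0] == p0:
--         rest = rest[1:]
--     if not rest:
--         return None
--     d = (rest[0][0] - p0[0], rest[0][1] - p0[1], rest[0][2] - p0[2])
--     for q in rest[1:]:
--         n = cross_product(d, (q[0] - p0[0], q[1] - p0[1], q[2] - p0[2]))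
--         if any(n):
--             return n
--     return None
-- ===== Notes on version B (the rewrite author's own statement) =====
-- stated objective: alternative
-- what changed: Replaces A's triple nested scan over all index triples (i,j,k) by two sequential linear passes anchored at the first point: skip leading duplicates of points[0] to fix the line direction d, then return the first non-zero cross_product(d, q - points[0]); a collinearity argument shows the first normal found is the same.
import Mathlib
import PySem

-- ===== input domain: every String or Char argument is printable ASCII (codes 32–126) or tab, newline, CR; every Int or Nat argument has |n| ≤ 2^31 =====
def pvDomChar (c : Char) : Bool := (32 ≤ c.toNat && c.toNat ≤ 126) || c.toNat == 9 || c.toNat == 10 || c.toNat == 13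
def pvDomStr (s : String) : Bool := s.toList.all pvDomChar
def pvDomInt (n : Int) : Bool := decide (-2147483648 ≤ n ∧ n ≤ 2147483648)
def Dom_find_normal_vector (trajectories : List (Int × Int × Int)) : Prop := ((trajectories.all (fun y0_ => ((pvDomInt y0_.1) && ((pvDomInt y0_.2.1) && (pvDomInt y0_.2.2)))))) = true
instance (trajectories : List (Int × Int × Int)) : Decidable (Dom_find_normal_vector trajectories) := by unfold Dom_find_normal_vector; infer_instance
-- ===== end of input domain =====

-- B replaces A's triple nested index scan by two linear passes anchored at the first point
-- (skip duplicates of the first point, then scan with the fixed direction); same return value.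

-- ===== PORT A =====
-- cross_product (module helper shared by both Pythons)
def pvCross (v1 v2 : Int × Int × Int) : Int × Int × Int :=
  (v1.2.1 * v2.2.2 - v1.2.2 * v2.2.1,
   v1.2.2 * v2.1 - v1.1 * v2.2.2,
   v1.1 * v2.2.1 - v1.2.1 * v2.1)

-- inner 'for k in range(j+1, len(points))' loop with early return
def pvLoopK (pts : List (Int × Int × Int)) (i j k : Nat) : Option (Int × Int × Int) :=
  if _h : k < pts.length then
    let pi_ := pts.getD i (0, 0, 0)
    let pj_ := pts.getD j (0, 0, 0)
    let pk_ := pts.getD k (0, 0, 0)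
    let v1 := (pj_.1 - pi_.1, pj_.2.1 - pi_.2.1, pj_.2.2 - pi_.2.2)
    let v2 := (pk_.1 - pi_.1, pk_.2.1 - pi_.2.1, pk_.2.2 - pi_.2.2)
    let n := pvCross v1 v2
    if n.1 ≠ 0 ∨ n.2.1 ≠ 0 ∨ n.2.2 ≠ 0 then some n else pvLoopK pts i j (k + 1)
  else none
termination_by pts.length - k

-- 'for j in range(i+1, len(points))'
def pvLoopJ (pts : List (Int × Int × Int)) (i j : Nat) : Option (Int × Int × Int) :=
  if _h : j < pts.length then
    match pvLoopK pts i j (j + 1) with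
    | some n => some n
    | none => pvLoopJ pts i (j + 1)
  else none
termination_by pts.length - j

-- 'for i in range(len(points))'
def pvLoopI (pts : List (Int × Int × Int)) (i : Nat) : Option (Int × Int × Int) :=
  if _h : i < pts.length then
    match pvLoopJ pts i (i + 1) with
    | some n => some n
    | none => pvLoopI pts (i + 1)
  else none
termination_by pts.length - i

def find_normal_vector (trajectories : List (Int × Int × Int)) : Option (Int × Int × Int) :=
  let points := trajectories.map (fun t => (t.1, t.2.1, t.2.2))
  pvLoopI points 0

-- ===== PORT B =====
def pvSub (a b : Int × Int × Int) : Int × Int × Int :=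
  (a.1 - b.1, a.2.1 - b.2.1, a.2.2 - b.2.2)

-- 'while rest and rest[0] == p0: rest = rest[1:]'
def pvDropEq (p0 : Int × Int × Int) : List (Int × Int × Int) → List (Int × Int × Int)
  | [] => []
  | q :: r => if q = p0 then pvDropEq p0 r else q :: r

-- 'for q in rest[1:]: …' with the fixed direction d
def pvScanB (p0 d : Int × Int × Int) : List (Int × Int × Int) → Option (Int × Int × Int)
  | [] => none
  | q :: r =>
    let n := pvCross d (pvSub q p0)
    if n.1 ≠ 0 ∨ n.2.1 ≠ 0 ∨ n.2.2 ≠ 0 then some n else pvScanB p0 d r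

def find_normal_vector_alt (trajectories : List (Int × Int × Int)) : Option (Int × Int × Int) :=
  let points := trajectories.map (fun t => (t.1, t.2.1, t.2.2))
  match points with
  | [] => none
  | p0 :: rest =>
    match pvDropEq p0 rest with
    | [] => none
    | q :: r => pvScanB p0 (pvSub q p0) r

-- ===== PRECONDITION & SPEC =====
def Spec_find_normal_vector (trajectories : List (Int × Int × Int)) (out : Option (Int × Int × Int)) : Prop := out = find_normal_vector_alt trajectories
instance (trajectories : List (Int × Int × Int)) (out : Option (Int × Int × Int)) : Decidable (Spec_find_normal_vector trajectories out) := by unfold Spec_find_normal_vector; infer_instance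

-- ===== CLAIM (what is proved, stated in full; the proofs are below) =====
def Claim_equal_find_normal_vector : Prop := ∀ (trajectories : List (Int × Int × Int)), Dom_find_normal_vector trajectories → Spec_find_normal_vector trajectories (find_normal_vector trajectories)

-- ===== LEMMAS AND PROOFS =====

-- Proof-side list reformulations of A's index loops
def pvScanA (p0 q : Int × Int × Int) : List (Int × Int × Int) → Option (Int × Int × Int)
  | [] => none
  | w :: r =>
    if (pvCross (pvSub q p0) (pvSub w p0)).1 ≠ 0 ∨ (pvCross (pvSub q p0) (pvSub w p0)).2.1 ≠ 0 ∨
        (pvCross (pvSub q p0) (pvSub w p0)).2.2 ≠ 0 then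
      some (pvCross (pvSub q p0) (pvSub w p0))
    else pvScanA p0 q r

def pvAJ (p : Int × Int × Int) : List (Int × Int × Int) → Option (Int × Int × Int)
  | [] => none
  | q :: r =>
    match pvScanA p q r with
    | some n => some n
    | none => pvAJ p r

def pvAI : List (Int × Int × Int) → Option (Int × Int × Int)
  | [] => none
  | p :: r =>
    match pvAJ p r with
    | some n => some n
    | none => pvAI r

-- B's body, named for the proofs
def pvAltBody (p0 : Int × Int × Int) (l : List (Int × Int × Int)) : Option (Int × Int × Int) :=
  match pvDropEq p0 l with
  | [] => none
  | q :: r => pvScanB p0 (pvSub q p0) r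

def pvAltTop (pts : List (Int × Int × Int)) : Option (Int × Int × Int) :=
  match pts with
  | [] => none
  | p0 :: rest => pvAltBody p0 rest

-- bridge: index loops = list recursion on suffixes
theorem pvLoopK_eq (pts : List (Int × Int × Int)) (i j k : Nat) :
    pvLoopK pts i j k = pvScanA (pts.getD i (0,0,0)) (pts.getD j (0,0,0)) (pts.drop k) := by
  by_cases h : k < pts.length
  · rw [pvLoopK]
    rw [List.drop_eq_getElem_cons h]
    simp only [h, dif_pos]
    rw [pvScanA]
    have hg : pts.getD k (0,0,0) = pts[k] := List.getD_eq_getElem pts (0,0,0) h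
    rw [hg]
    simp only [pvSub]
    split
    · rfl
    · exact pvLoopK_eq pts i j (k+1)
  · rw [pvLoopK]
    simp only [h, dif_neg, not_false_iff]
    rw [List.drop_eq_nil_of_le (Nat.le_of_not_lt h), pvScanA]
termination_by pts.length - k

theorem pvLoopJ_eq (pts : List (Int × Int × Int)) (i j : Nat) :
    pvLoopJ pts i j = pvAJ (pts.getD i (0,0,0)) (pts.drop j) := by
  by_cases h : j < pts.length
  · rw [pvLoopJ]
    rw [List.drop_eq_getElem_cons h]
    simp only [h, dif_pos]
    rw [pvAJ]
    have hg : pts.getD j (0,0,0) = pts[j] := List.getD_eq_getElem pts (0,0,0) h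
    rw [← hg, pvLoopK_eq pts i j (j+1)]
    cases pvScanA (pts.getD i (0,0,0)) (pts.getD j (0,0,0)) (pts.drop (j+1)) with
    | some n => rfl
    | none => exact pvLoopJ_eq pts i (j+1)
  · rw [pvLoopJ]
    simp only [h, dif_neg, not_false_iff]
    rw [List.drop_eq_nil_of_le (Nat.le_of_not_lt h), pvAJ]
termination_by pts.length - j

theorem pvLoopI_eq (pts : List (Int × Int × Int)) (i : Nat) :
    pvLoopI pts i = pvAI (pts.drop i) := by
  by_cases h : i < pts.length
  · rw [pvLoopI]
    rw [List.drop_eq_getElem_cons h]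
    simp only [h, dif_pos]
    rw [pvAI]
    have hg : pts.getD i (0,0,0) = pts[i] := List.getD_eq_getElem pts (0,0,0) h
    rw [pvLoopJ_eq pts i (i+1), hg]
    cases pvAJ pts[i] (pts.drop (i+1)) with
    | some n => rfl
    | none => exact pvLoopI_eq pts (i+1)
  · rw [pvLoopI]
    simp only [h, dif_neg, not_false_iff]
    rw [List.drop_eq_nil_of_le (Nat.le_of_not_lt h), pvAI]
termination_by pts.length - i

-- algebra on integer triples
theorem pvCond_iff (n : Int × Int × Int) :
    (n.1 ≠ 0 ∨ n.2.1 ≠ 0 ∨ n.2.2 ≠ 0) ↔ n ≠ ((0,0,0) : Int × Int × Int) := by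
  obtain ⟨a, b, c⟩ := n
  simp [Prod.ext_iff]
  tauto

theorem pvCross_self_sub (p w : Int × Int × Int) :
    pvCross (pvSub p p) (pvSub w p) = ((0,0,0) : Int × Int × Int) := by
  obtain ⟨a, b, c⟩ := p; obtain ⟨x, y, z⟩ := w
  simp [pvCross, pvSub]

theorem pvCross_symm_zero {u w : Int × Int × Int}
    (h : pvCross u w = ((0,0,0) : Int × Int × Int)) :
    pvCross w u = ((0,0,0) : Int × Int × Int) := by
  obtain ⟨a, b, c⟩ := u; obtain ⟨x, y, z⟩ := w
  simp [pvCross, Prod.ext_iff] at h ⊢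
  obtain ⟨h1, h2, h3⟩ := h
  refine ⟨by linarith, by linarith, by linarith⟩

theorem pvCross_self (u : Int × Int × Int) :
    pvCross u u = ((0,0,0) : Int × Int × Int) := by
  obtain ⟨a, b, c⟩ := u
  simp [pvCross, Int.mul_comm]

theorem pvSub_ne_zero {q p : Int × Int × Int} (h : q ≠ p) :
    pvSub q p ≠ ((0,0,0) : Int × Int × Int) := by
  obtain ⟨a, b, c⟩ := q; obtain ⟨x, y, z⟩ := p
  intro hz
  apply h
  simp [pvSub, Prod.ext_iff] at hz
  simp [Prod.ext_iff]
  omega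

-- if u and v are both parallel to a common nonzero d, they are parallel to each other
theorem pvParallel {d u v : Int × Int × Int}
    (hd : d ≠ ((0,0,0) : Int × Int × Int))
    (hu : pvCross d u = ((0,0,0) : Int × Int × Int))
    (hv : pvCross d v = ((0,0,0) : Int × Int × Int)) :
    pvCross u v = ((0,0,0) : Int × Int × Int) := by
  obtain ⟨d1, d2, d3⟩ := d; obtain ⟨u1, u2, u3⟩ := u; obtain ⟨v1, v2, v3⟩ := v
  simp [pvCross, Prod.ext_iff] at hd hu hv ⊢
  obtain ⟨hu1, hu2, hu3⟩ := hu
  obtain ⟨hv1, hv2, hv3⟩ := hv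
  have hcases : d1 ≠ 0 ∨ d2 ≠ 0 ∨ d3 ≠ 0 := by tauto
  rcases hcases with h | h | h
  · refine ⟨?_, ?_, ?_⟩
    · apply mul_left_cancel₀ h; linear_combination u1 * hv1 + v3 * hu3 + v2 * hu2
    · apply mul_left_cancel₀ h; linear_combination u1 * hv2 - v1 * hu2
    · apply mul_left_cancel₀ h; linear_combination u1 * hv3 - v1 * hu3
  · refine ⟨?_, ?_, ?_⟩
    · apply mul_left_cancel₀ h; linear_combination u2 * hv1 - v2 * hu1
    · apply mul_left_cancel₀ h; linear_combination u2 * hv2 + v1 * hu1 + v3 * hu3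
    · apply mul_left_cancel₀ h; linear_combination u2 * hv3 - v2 * hu3
  · refine ⟨?_, ?_, ?_⟩
    · apply mul_left_cancel₀ h; linear_combination u3 * hv1 - v3 * hu1
    · apply mul_left_cancel₀ h; linear_combination u3 * hv2 - v3 * hu2
    · apply mul_left_cancel₀ h; linear_combination u3 * hv3 + v2 * hu2 + v1 * hu1

-- re-anchoring: all crosses at p0 vanish ⟹ cross at a new anchor p vanishes
theorem pvShift {p0 a b p : Int × Int × Int}
    (hab : pvCross (pvSub a p0) (pvSub b p0) = ((0,0,0) : Int × Int × Int))
    (hap : pvCross (pvSub a p0) (pvSub p p0) = ((0,0,0) : Int × Int × Int))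
    (hpb : pvCross (pvSub p p0) (pvSub b p0) = ((0,0,0) : Int × Int × Int)) :
    pvCross (pvSub a p) (pvSub b p) = ((0,0,0) : Int × Int × Int) := by
  obtain ⟨o1, o2, o3⟩ := p0; obtain ⟨a1, a2, a3⟩ := a
  obtain ⟨b1, b2, b3⟩ := b; obtain ⟨p1, p2, p3⟩ := p
  simp [pvCross, pvSub, Prod.ext_iff] at hab hap hpb ⊢
  obtain ⟨h1, h2, h3⟩ := hab
  obtain ⟨g1, g2, g3⟩ := hap
  obtain ⟨f1, f2, f3⟩ := hpb
  refine ⟨by linear_combination h1 - g1 - f1, by linear_combination h2 - g2 - f2,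
    by linear_combination h3 - g3 - f3⟩

-- scan characterisations
theorem pvScanA_eq_none_iff (p0 q : Int × Int × Int) (l : List (Int × Int × Int)) :
    pvScanA p0 q l = none ↔
      ∀ w ∈ l, pvCross (pvSub q p0) (pvSub w p0) = ((0,0,0) : Int × Int × Int) := by
  induction l with
  | nil => simp [pvScanA]
  | cons w r ih =>
    rw [pvScanA]
    split_ifs with hcond
    · constructor
      · intro H; simp at H
      · intro H
        exact absurd (H w List.mem_cons_self) ((pvCond_iff _).mp hcond)
    · have hz : pvCross (pvSub q p0) (pvSub w p0) = ((0,0,0) : Int × Int × Int) := by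
        by_contra hne
        exact hcond ((pvCond_iff _).mpr hne)
      rw [ih]
      constructor
      · intro H w' hw'
        rcases List.mem_cons.mp hw' with rfl | hmem
        · exact hz
        · exact H w' hmem
      · intro H w' hmem
        exact H w' (List.mem_cons_of_mem _ hmem)

theorem pvScanA_self (p0 : Int × Int × Int) (l : List (Int × Int × Int)) :
    pvScanA p0 p0 l = none := by
  rw [pvScanA_eq_none_iff]
  intro w _
  exact pvCross_self_sub p0 w

theorem pvScanB_eq_scanA (p0 q : Int × Int × Int) (l : List (Int × Int × Int)) :
    pvScanB p0 (pvSub q p0) l = pvScanA p0 q l := by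
  induction l with
  | nil => rfl
  | cons w r ih =>
    simp only [pvScanB, pvScanA]
    split_ifs with h
    · rfl
    · exact ih

-- pvAJ = none extracts: all anchored crosses vanish
theorem pvAJ_none_forward (p0 : Int × Int × Int) (l : List (Int × Int × Int))
    (h : pvAJ p0 l = none) :
    ∀ a ∈ l, ∀ b ∈ l, pvCross (pvSub a p0) (pvSub b p0) = ((0,0,0) : Int × Int × Int) := by
  induction l with
  | nil => intro a ha; cases ha
  | cons q r ih =>
    rw [pvAJ] at h
    cases hs : pvScanA p0 q r with
    | some n => rw [hs] at h; cases h
    | none =>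
      rw [hs] at h
      have hforw := (pvScanA_eq_none_iff p0 q r).mp hs
      intro a ha b hb
      rcases List.mem_cons.mp ha with rfl | ha'
      · rcases List.mem_cons.mp hb with rfl | hb'
        · exact pvCross_self _
        · exact hforw b hb'
      · rcases List.mem_cons.mp hb with rfl | hb'
        · exact pvCross_symm_zero (hforw a ha')
        · exact ih h a ha' b hb'

-- pvAJ = none builders
theorem pvAJ_none_of_pairs (p : Int × Int × Int) (l : List (Int × Int × Int))
    (H : ∀ a ∈ l, ∀ b ∈ l, pvCross (pvSub a p) (pvSub b p) = ((0,0,0) : Int × Int × Int)) :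
    pvAJ p l = none := by
  induction l with
  | nil => rfl
  | cons q r ih =>
    rw [pvAJ]
    have hs : pvScanA p q r = none := by
      rw [pvScanA_eq_none_iff]
      intro w hw
      exact H q List.mem_cons_self w (List.mem_cons_of_mem _ hw)
    rw [hs]
    exact ih (fun a ha b hb => H a (List.mem_cons_of_mem _ ha) b (List.mem_cons_of_mem _ hb))

theorem pvAJ_none_of_parallel (p0 d : Int × Int × Int)
    (hd : d ≠ ((0,0,0) : Int × Int × Int)) (l : List (Int × Int × Int))
    (H : ∀ w ∈ l, pvCross d (pvSub w p0) = ((0,0,0) : Int × Int × Int)) :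
    pvAJ p0 l = none := by
  apply pvAJ_none_of_pairs
  intro a ha b hb
  exact pvParallel hd (H a ha) (H b hb)

theorem pvAI_none_of (p0 : Int × Int × Int) (l : List (Int × Int × Int))
    (H : ∀ a ∈ l, ∀ b ∈ l, pvCross (pvSub a p0) (pvSub b p0) = ((0,0,0) : Int × Int × Int)) :
    pvAI l = none := by
  induction l with
  | nil => rfl
  | cons p r ih =>
    rw [pvAI]
    have hJ : pvAJ p r = none := by
      apply pvAJ_none_of_pairs
      intro a ha b hb
      exact pvShift
        (H a (List.mem_cons_of_mem _ ha) b (List.mem_cons_of_mem _ hb))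
        (H a (List.mem_cons_of_mem _ ha) p List.mem_cons_self)
        (H p List.mem_cons_self b (List.mem_cons_of_mem _ hb))
    rw [hJ]
    exact ih (fun a ha b hb => H a (List.mem_cons_of_mem _ ha) b (List.mem_cons_of_mem _ hb))

-- the j-loop anchored at p0 equals B's two passes
theorem pvAJ_eq_B (p0 : Int × Int × Int) (l : List (Int × Int × Int)) :
    pvAJ p0 l = pvAltBody p0 l := by
  induction l with
  | nil => rfl
  | cons q r ih =>
    by_cases hq : q = p0
    · subst hq
      rw [pvAJ, pvScanA_self]
      have hD : pvAltBody q (q :: r) = pvAltBody q r := by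
        simp [pvAltBody, pvDropEq]
      rw [hD]
      exact ih
    · have hD : pvDropEq p0 (q :: r) = q :: r := by
        simp only [pvDropEq, if_neg hq]
      rw [pvAJ]
      simp only [pvAltBody, hD, pvScanB_eq_scanA]
      cases hs : pvScanA p0 q r with
      | some n => rfl
      | none =>
        have hforw := (pvScanA_eq_none_iff p0 q r).mp hs
        exact pvAJ_none_of_parallel p0 (pvSub q p0) (pvSub_ne_zero hq) r hforw

theorem pvAI_eq_alt (pts : List (Int × Int × Int)) :
    pvAI pts = pvAltTop pts := by
  cases pts with
  | nil => rfl
  | cons p0 rest =>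
    rw [pvAI]
    have hB := pvAJ_eq_B p0 rest
    cases hJ : pvAJ p0 rest with
    | some n =>
      rw [hJ] at hB
      simp only [pvAltTop, ← hB]
    | none =>
      rw [hJ] at hB
      simp only [pvAltTop, ← hB]
      exact pvAI_none_of p0 rest (pvAJ_none_forward p0 rest hJ)

theorem pvAlt_eq (trajectories : List (Int × Int × Int)) :
    find_normal_vector_alt trajectories =
      pvAltTop (trajectories.map (fun t => (t.1, t.2.1, t.2.2))) := by
  unfold find_normal_vector_alt pvAltTop pvAltBody
  cases trajectories.map (fun t => (t.1, t.2.1, t.2.2)) with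
  | nil => rfl
  | cons p0 rest => cases pvDropEq p0 rest <;> rfl

-- ===== VERDICT (by name: the statement is the Claim_ definition above) =====
theorem find_normal_vector_spec : Claim_equal_find_normal_vector := by
  intro trajectories _
  unfold Spec_find_normal_vector find_normal_vector
  rw [pvLoopI_eq, pvAlt_eq]
  simpa using pvAI_eq_alt (trajectories.map (fun t => (t.1, t.2.1, t.2.2)))
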